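-- pv_equiv track=rewrite | github.com/Energy-CeRBeR/Tinkoff-algorithms | GG.py | find_longest_anagram_subarray
-- ===== SOURCE A (Python) =====
-- from collections import Counter
--
-- def find_longest_anagram_subarray(a, b):
--     max_len = 0
--
--     # Перебор всех возможных длин подотрезков
--     for length in range(1, min(len(a), len(b)) + 1):
--         # Перебор всех подотрезков a данной длины
--         for start_a in range(len(a) - length + 1):
--             counter_a = Counter(a[start_a:start_a+length])
--
--             # Перебор всех подотрезков b данной длины
--             for start_b in range(len(b) - length + 1):
--                 counter_b = Counter(b[start_b:start_b+length])
--
--                 # Сравнение подотрезков на анаграммность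
--                 if counter_a == counter_b:
--                     max_len = length
--                     break  # При обнаружении анаграммы прекращаем поиск для данной длины
--
--             if max_len == length:
--                 break  # Если для данной длины нашли анаграмму, дальше её увеличивать нет смысла
--
--     return max_len
-- ===== SOURCE B (Python) =====
-- def find_longest_anagram_subarray(a, b):
--     best = 0
--     n, m = len(a), len(b)
--     for length in range(1, min(n, m) + 1):
--         # canonical multiset signature of every window of a, indexed in a hash set
--         sigs = {tuple(sorted(a[i:i + length])) for i in range(n - length + 1)}
--         if any(tuple(sorted(b[j:j + length])) in sigs for j in range(m - length + 1)):
--             best = length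
--     return best
-- ===== Notes on version B (the rewrite author's own statement) =====
-- stated objective: faster
-- what changed: Per window length, B builds a hash set of canonical sorted-window signatures of a once and tests each window of b by O(1) set membership, instead of A's nested re-scan comparing Counters of every (a-window, b-window) pair.
import Mathlib
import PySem

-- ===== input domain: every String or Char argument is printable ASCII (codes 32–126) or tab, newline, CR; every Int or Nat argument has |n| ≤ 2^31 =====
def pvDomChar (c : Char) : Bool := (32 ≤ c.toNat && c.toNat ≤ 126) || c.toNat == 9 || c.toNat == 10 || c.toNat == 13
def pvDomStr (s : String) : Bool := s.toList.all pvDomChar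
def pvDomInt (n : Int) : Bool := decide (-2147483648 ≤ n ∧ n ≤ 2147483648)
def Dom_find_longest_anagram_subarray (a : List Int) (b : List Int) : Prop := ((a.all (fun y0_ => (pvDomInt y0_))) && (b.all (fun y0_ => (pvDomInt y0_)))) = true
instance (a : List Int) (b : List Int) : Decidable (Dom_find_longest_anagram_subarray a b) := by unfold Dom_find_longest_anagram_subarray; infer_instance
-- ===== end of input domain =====

-- B replaces A's all-pairs Counter comparisons by, per length, one hash set of sorted-window
-- signatures of a probed by each window of b (objective: faster, measured).

-- ===== PORT A =====
-- Counter(xs) == Counter(ys): a Counter built from a list holds exactly the positive counts of its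
-- elements, so equality is "same count for every element of either list" (exact, ported by hand).
def pvCounterEq (xs ys : List Int) : Bool :=
  (xs.all fun v => xs.count v == ys.count v) && (ys.all fun v => ys.count v == xs.count v)

-- the two breaks make max_len := length exactly when some (start_a, start_b) pair matches
def find_longest_anagram_subarray (a : List Int) (b : List Int) : Int :=
  (PySem.List.pyRange 1 ((min a.length b.length : Int) + 1) 1).foldl
    (fun max_len length =>
      if (PySem.List.pyRange 0 ((a.length : Int) - length + 1) 1).any (fun start_a =>
            (PySem.List.pyRange 0 ((b.length : Int) - length + 1) 1).any (fun start_b =>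
              pvCounterEq (PySem.List.slice a (some start_a) (some (start_a + length)))
                          (PySem.List.slice b (some start_b) (some (start_b + length)))))
      then length else max_len) 0

-- ===== PORT B =====
def find_longest_anagram_subarray_alt (a : List Int) (b : List Int) : Int :=
  (PySem.List.pyRange 1 ((min a.length b.length : Int) + 1) 1).foldl
    (fun best length =>
      let sigs : PySem.Set (List Int) :=
        PySem.Set.ofList ((PySem.List.pyRange 0 ((a.length : Int) - length + 1) 1).map
          (fun i => PySem.List.sorted (PySem.List.slice a (some i) (some (i + length))) (fun x => x) false))
      if (PySem.List.pyRange 0 ((b.length : Int) - length + 1) 1).any (fun j =>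
            PySem.Set.contains sigs (PySem.List.sorted (PySem.List.slice b (some j) (some (j + length))) (fun x => x) false))
      then length else best) 0

-- ===== PRECONDITION & SPEC =====
def Spec_find_longest_anagram_subarray (a : List Int) (b : List Int) (out : Int) : Prop := out = find_longest_anagram_subarray_alt a b
instance (a : List Int) (b : List Int) (out : Int) : Decidable (Spec_find_longest_anagram_subarray a b out) := by unfold Spec_find_longest_anagram_subarray; infer_instance

-- ===== CLAIM (what is proved, stated in full; the proofs are below) =====
def Claim_equal_find_longest_anagram_subarray : Prop := ∀ (a : List Int) (b : List Int), Dom_find_longest_anagram_subarray a b → Spec_find_longest_anagram_subarray a b (find_longest_anagram_subarray a b)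

-- ===== LEMMAS AND PROOFS =====
lemma pvCounterEq_iff_perm (xs ys : List Int) : pvCounterEq xs ys = true ↔ xs.Perm ys := by
  unfold pvCounterEq
  simp only [Bool.and_eq_true, List.all_eq_true, beq_iff_eq]
  constructor
  · rintro ⟨h1, h2⟩
    rw [List.perm_iff_count]
    intro v
    by_cases hx : v ∈ xs
    · exact h1 v hx
    · by_cases hy : v ∈ ys
      · exact (h2 v hy).symm
      · simp [List.count_eq_zero_of_not_mem, hx, hy]
  · intro h; exact ⟨fun v _ => h.count_eq v, fun v _ => (h.count_eq v).symm⟩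

lemma pv_cond_eq (a b : List Int) (length : Int) :
    ((PySem.List.pyRange 0 ((a.length : Int) - length + 1) 1).any (fun start_a =>
        (PySem.List.pyRange 0 ((b.length : Int) - length + 1) 1).any (fun start_b =>
          pvCounterEq (PySem.List.slice a (some start_a) (some (start_a + length)))
                      (PySem.List.slice b (some start_b) (some (start_b + length))))))
    = ((PySem.List.pyRange 0 ((b.length : Int) - length + 1) 1).any (fun j =>
        PySem.Set.contains
          (PySem.Set.ofList ((PySem.List.pyRange 0 ((a.length : Int) - length + 1) 1).map
            (fun i => PySem.List.sorted (PySem.List.slice a (some i) (some (i + length))) (fun x => x) false)))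
          (PySem.List.sorted (PySem.List.slice b (some j) (some (j + length))) (fun x => x) false))) := by
  rw [Bool.eq_iff_iff]
  simp only [List.any_eq_true, PySem.Set.contains_iff, PySem.Set.mem_ofList, List.mem_map,
    pvCounterEq_iff_perm]
  constructor
  · rintro ⟨sa, hsa, sb, hsb, hperm⟩
    exact ⟨sb, hsb, sa, hsa, (PySem.List.sorted_id_eq_sorted_id_iff_perm _ _).mpr hperm⟩
  · rintro ⟨sb, hsb, sa, hsa, hsort⟩
    exact ⟨sa, hsa, sb, hsb, (PySem.List.sorted_id_eq_sorted_id_iff_perm _ _).mp hsort⟩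

-- ===== VERDICT (by name: the statement is the Claim_ definition above) =====
theorem find_longest_anagram_subarray_spec : Claim_equal_find_longest_anagram_subarray := by
  intro a b _
  unfold Spec_find_longest_anagram_subarray find_longest_anagram_subarray find_longest_anagram_subarray_alt
  apply PySem.List.foldl_congr_mem
  intro acc length _
  show (if _ then _ else _) = _
  rw [pv_cond_eq]
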